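-- pv_equiv track=rewrite | github.com/kensho-technologies/kenverters | kensho_kenverters/output_to_tables.py | _split_row_ids
-- ===== SOURCE A (Python) =====
-- def _split_row_ids(
--     max_column_header_row_id: int | None,
--     n_row: int,
--     project_row_headers_rows: list[int],
-- ) -> list[list[int]]:
--     """Split row ids into several sub-list of row ids based on the project row headers rows."""
--     if max_column_header_row_id is not None:
--         initial_row_id = max_column_header_row_id + 1
--     else:
--         initial_row_id = 0
--     subtables_row_id_list = []
--     row_id_cursor = initial_row_id
--     non_project_row_header_row_id_list: list[int] = []
--     for row_idx in range(initial_row_id, n_row):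
--         if row_idx == n_row - 1:
--             subtables_row_id_list.append(list(range(row_id_cursor, row_idx + 1)))
--         elif row_idx in project_row_headers_rows:
--             if len(non_project_row_header_row_id_list) > 0:
--                 subtables_row_id_list.append(list(range(row_id_cursor, row_idx)))
--                 row_id_cursor = row_idx
--                 non_project_row_header_row_id_list = []
--         elif row_idx not in project_row_headers_rows:
--             non_project_row_header_row_id_list.append(row_idx)
--     return subtables_row_id_list
-- ===== SOURCE B (Python) =====
-- def _split_row_ids(
--     max_column_header_row_id,
--     n_row,
--     project_row_headers_rows,
-- ):
--     """Split row ids into sub-lists by walking only the project-header positions."""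
--     if max_column_header_row_id is not None:
--         initial_row_id = max_column_header_row_id + 1
--     else:
--         initial_row_id = 0
--     if initial_row_id >= n_row:
--         return []
--     candidates = sorted({h for h in project_row_headers_rows
--                          if initial_row_id <= h < n_row - 1})
--     subtables = []
--     cursor = initial_row_id
--     edge = initial_row_id  # rows [cursor, edge) are all headers (contiguous run)
--     for h in candidates:
--         if h != edge:  # a non-header row lies in [cursor, h): cut here
--             subtables.append(list(range(cursor, h)))
--             cursor = h
--         edge = h + 1
--     subtables.append(list(range(cursor, n_row)))
--     return subtables
-- ===== Notes on version B (the rewrite author's own statement) =====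
-- stated objective: alternative
-- what changed: B no longer scans every row with repeated 'in'-list membership tests; it builds the sorted set of header rows in range once and walks only those candidate cut points with a cursor/edge pair, emitting each segment directly.
import Mathlib
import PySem

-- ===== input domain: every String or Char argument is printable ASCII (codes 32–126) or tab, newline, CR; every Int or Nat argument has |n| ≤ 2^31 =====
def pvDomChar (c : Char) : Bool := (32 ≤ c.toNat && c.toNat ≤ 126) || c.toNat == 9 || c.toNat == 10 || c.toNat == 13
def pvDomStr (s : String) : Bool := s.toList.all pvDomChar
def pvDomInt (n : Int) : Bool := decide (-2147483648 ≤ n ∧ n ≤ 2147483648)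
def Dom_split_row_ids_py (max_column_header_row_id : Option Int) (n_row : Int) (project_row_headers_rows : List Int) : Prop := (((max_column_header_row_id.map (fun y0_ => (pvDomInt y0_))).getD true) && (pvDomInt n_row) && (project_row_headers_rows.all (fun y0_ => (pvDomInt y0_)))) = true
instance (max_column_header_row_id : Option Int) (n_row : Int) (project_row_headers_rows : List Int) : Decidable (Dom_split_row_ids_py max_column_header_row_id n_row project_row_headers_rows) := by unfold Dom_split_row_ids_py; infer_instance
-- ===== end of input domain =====

-- B walks only the sorted set of in-range project-header rows with a cursor/edge pair instead of scanning every row with list membership tests; same return value (alternative decomposition).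


-- ===== PORT A =====
-- A's loop body (one iteration over row_idx), kept as a named helper for the fold.
def stepA (n_row : Int) (hdrs : List Int) (s : List (List Int) × Int × List Int) (row_idx : Int) :
    List (List Int) × Int × List Int :=
  match s with
  | (acc, cursor, nph) =>
    if row_idx = n_row - 1 then
      (acc ++ [PySem.List.pyRange cursor (row_idx + 1) 1], cursor, nph)
    else if hdrs.contains row_idx then
      (if nph.length > 0 then (acc ++ [PySem.List.pyRange cursor row_idx 1], row_idx, ([] : List Int)) else (acc, cursor, nph))
    else if ¬ hdrs.contains row_idx then
      (acc, cursor, nph ++ [row_idx])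
    else (acc, cursor, nph)

def split_row_ids_py (max_column_header_row_id : Option Int) (n_row : Int) (project_row_headers_rows : List Int) : List (List Int) :=
  let initial_row_id : Int := match max_column_header_row_id with | some v => v + 1 | none => 0
  ((PySem.List.pyRange initial_row_id n_row 1).foldl (stepA n_row project_row_headers_rows)
    ([], initial_row_id, [])).1

-- ===== PORT B =====
-- B's loop body over the candidate header positions.
def stepB (s : List (List Int) × Int × Int) (h : Int) : List (List Int) × Int × Int :=
  match s with
  | (out, cursor, edge) =>
    if h ≠ edge then (out ++ [PySem.List.pyRange cursor h 1], h, h + 1)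
    else (out, cursor, h + 1)

def split_row_ids_py_alt (max_column_header_row_id : Option Int) (n_row : Int) (project_row_headers_rows : List Int) : List (List Int) :=
  let initial_row_id : Int := match max_column_header_row_id with | some v => v + 1 | none => 0
  if initial_row_id ≥ n_row then []
  else
    let candidates := PySem.List.sorted
      (PySem.Set.ofList (project_row_headers_rows.filter (fun h => decide (initial_row_id ≤ h ∧ h < n_row - 1))))
      (fun x => x) false
    let st := candidates.foldl stepB ([], initial_row_id, initial_row_id)
    st.1 ++ [PySem.List.pyRange st.2.1 n_row 1]

-- ===== PRECONDITION & SPEC =====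
def Spec_split_row_ids_py (max_column_header_row_id : Option Int) (n_row : Int) (project_row_headers_rows : List Int) (out : List (List Int)) : Prop := out = split_row_ids_py_alt max_column_header_row_id n_row project_row_headers_rows
instance (max_column_header_row_id : Option Int) (n_row : Int) (project_row_headers_rows : List Int) (out : List (List Int)) : Decidable (Spec_split_row_ids_py max_column_header_row_id n_row project_row_headers_rows out) := by unfold Spec_split_row_ids_py; infer_instance

-- ===== CLAIM (what is proved, stated in full; the proofs are below) =====
def Claim_equal_split_row_ids_py : Prop := ∀ (max_column_header_row_id : Option Int) (n_row : Int) (project_row_headers_rows : List Int), Dom_split_row_ids_py max_column_header_row_id n_row project_row_headers_rows → Spec_split_row_ids_py max_column_header_row_id n_row project_row_headers_rows (split_row_ids_py max_column_header_row_id n_row project_row_headers_rows)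

-- ===== LEMMAS AND PROOFS =====

-- Common reference recursion over the rows: fuel = (n - i).toNat, flag = "a non-header row was seen since the last cut".
def specAux (hdrs : List Int) (n : Int) : Nat → Int → Int → Bool → List (List Int) → List (List Int)
  | 0, _, _, _, acc => acc
  | fuel + 1, i, cursor, flag, acc =>
    if i = n - 1 then acc ++ [PySem.List.pyRange cursor (i + 1) 1]
    else if hdrs.contains i then
      if flag then specAux hdrs n fuel (i + 1) i false (acc ++ [PySem.List.pyRange cursor i 1])
      else specAux hdrs n fuel (i + 1) cursor flag acc
    else specAux hdrs n fuel (i + 1) cursor true acc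

-- A's fold equals the reference recursion.
lemma A_loop (hdrs : List Int) (n : Int) : ∀ (fuel : Nat) (i : Int), (n - i).toNat = fuel →
    ∀ (acc : List (List Int)) (cursor : Int) (nph : List Int) (flag : Bool),
    (0 < nph.length ↔ flag = true) →
    ((PySem.List.pyRange i n 1).foldl (stepA n hdrs) (acc, cursor, nph)).1
      = specAux hdrs n fuel i cursor flag acc := by
  intro fuel
  induction fuel with
  | zero =>
    intro i hi acc cursor nph flag hf
    rw [PySem.List.pyRange_one_eq_nil (by omega)]
    simp [specAux]
  | succ f ih =>
    intro i hi acc cursor nph flag hf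
    have hilt : i < n := by omega
    rw [PySem.List.pyRange_one_cons hilt]
    simp only [List.foldl_cons]
    by_cases h1 : i = n - 1
    · have hs : stepA n hdrs (acc, cursor, nph) i
          = (acc ++ [PySem.List.pyRange cursor (i + 1) 1], cursor, nph) := by
        simp [stepA, h1]
      rw [hs, ih (i + 1) (by omega) _ _ _ flag hf]
      have hf0 : f = 0 := by omega
      subst hf0
      simp [specAux, h1]
    · by_cases h2 : i ∈ hdrs
      · by_cases h3 : 0 < nph.length
        · have hfl : flag = true := hf.mp h3
          have hs : stepA n hdrs (acc, cursor, nph) i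
              = (acc ++ [PySem.List.pyRange cursor i 1], i, ([] : List Int)) := by
            simp [stepA, h1, h2, h3]
          rw [hs, ih (i + 1) (by omega) _ _ _ false (by simp)]
          simp [specAux, h1, h2, hfl]
        · have hfl : flag = false := by cases flag <;> simp_all
          have hs : stepA n hdrs (acc, cursor, nph) i = (acc, cursor, nph) := by
            simp [stepA, h1, h2, h3]
          rw [hs, ih (i + 1) (by omega) _ _ _ flag hf]
          simp [specAux, h1, h2, hfl]
      · have hs : stepA n hdrs (acc, cursor, nph) i = (acc, cursor, nph ++ [i]) := by
          simp [stepA, h1, h2]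
        rw [hs, ih (i + 1) (by omega) _ _ _ true (by simp)]
        simp [specAux, h1, h2]

-- Over a stretch of non-header rows the reference recursion only moves i forward and sets the flag.
lemma stretch (hdrs : List Int) (n : Int) : ∀ (k : Nat) (i j : Int), (j - i).toNat = k → i ≤ j → j ≤ n - 1 →
    (∀ r : Int, i ≤ r → r < j → r ∉ hdrs) →
    ∀ (cursor : Int) (flag : Bool) (acc : List (List Int)),
    specAux hdrs n (n - i).toNat i cursor flag acc
      = specAux hdrs n (n - j).toNat j cursor (flag || decide (i < j)) acc := by
  intro k
  induction k with
  | zero =>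
    intro i j hk hij hjn hnh cursor flag acc
    have : i = j := by omega
    subst this
    simp
  | succ m ih =>
    intro i j hk hij hjn hnh cursor flag acc
    have hlt : i < j := by omega
    have h1 : i ≠ n - 1 := by omega
    have h2 : i ∉ hdrs := hnh i le_rfl hlt
    have hfuel : (n - i).toNat = (n - (i + 1)).toNat + 1 := by omega
    rw [hfuel]
    have hstep : specAux hdrs n ((n - (i + 1)).toNat + 1) i cursor flag acc
        = specAux hdrs n (n - (i + 1)).toNat (i + 1) cursor true acc := by
      simp [specAux, h1, h2]
    rw [hstep, ih (i + 1) j (by omega) (by omega) hjn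
        (fun r hr1 hr2 => hnh r (by omega) hr2) cursor true acc]
    simp [hlt]

-- B's fold over the sorted candidate header positions equals the reference recursion.
set_option maxRecDepth 8192 in
lemma B_loop (hdrs : List Int) (n : Int) : ∀ (cs : List Int), cs.Pairwise (· < ·) →
    ∀ (i cursor edge : Int) (flag : Bool) (acc : List (List Int)),
    i ≤ n - 1 →
    (∀ x : Int, x ∈ cs ↔ (x ∈ hdrs ∧ i ≤ x ∧ x < n - 1)) →
    (if flag = true then edge < i else edge = i) →
    ((cs.foldl stepB (acc, cursor, edge)).1
      ++ [PySem.List.pyRange (cs.foldl stepB (acc, cursor, edge)).2.1 n 1])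
      = specAux hdrs n (n - i).toNat i cursor flag acc := by
  intro cs
  induction cs with
  | nil =>
    intro hp i cursor edge flag acc hin hmem hedge
    simp only [List.foldl_nil]
    have hnh : ∀ r : Int, i ≤ r → r < n - 1 → r ∉ hdrs := by
      intro r hr1 hr2 hrh
      have : r ∈ ([] : List Int) := (hmem r).mpr ⟨hrh, hr1, hr2⟩
      simp at this
    rw [stretch hdrs n (n - 1 - i).toNat i (n - 1) (by omega) (by omega) le_rfl hnh cursor flag acc]
    have hfuel : (n - (n - 1)).toNat = 0 + 1 := by omega
    rw [hfuel]
    have hn : n - 1 + 1 = n := by omega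
    simp [specAux, hn]
  | cons h cs' ih =>
    intro hp i cursor edge flag acc hin hmem hedge
    have hh := (hmem h).mp (List.mem_cons_self)
    obtain ⟨hhc, hhi, hhn⟩ := hh
    have hptail : cs'.Pairwise (· < ·) := hp.of_cons
    have hgt : ∀ x ∈ cs', h < x := fun x hx => List.rel_of_pairwise_cons hp hx
    have hmem' : ∀ x : Int, x ∈ cs' ↔ (x ∈ hdrs ∧ h + 1 ≤ x ∧ x < n - 1) := by
      intro x
      constructor
      · intro hx
        have := (hmem x).mp (List.mem_cons_of_mem h hx)
        exact ⟨this.1, by have := hgt x hx; omega, this.2.2⟩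
      · intro ⟨hc, hx1, hx2⟩
        have : x ∈ h :: cs' := (hmem x).mpr ⟨hc, by omega, hx2⟩
        rcases List.mem_cons.mp this with heq | hmemt
        · omega
        · exact hmemt
    -- rows i..h-1 are non-headers
    have hnh : ∀ r : Int, i ≤ r → r < h → r ∉ hdrs := by
      intro r hr1 hr2 hrh
      have : r ∈ h :: cs' := (hmem r).mpr ⟨hrh, hr1, by omega⟩
      rcases List.mem_cons.mp this with heq | hmemt
      · omega
      · have := hgt r hmemt; omega
    rw [stretch hdrs n (h - i).toNat i h (by omega) (by omega) (by omega) hnh cursor flag acc]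
    have hfuel : (n - h).toNat = (n - (h + 1)).toNat + 1 := by omega
    rw [hfuel]
    have hne : h ≠ n - 1 := by omega
    simp only [List.foldl_cons]
    by_cases hflag : flag = true
    · -- a non-header was seen: both sides cut at h
      subst hflag
      have hel : edge < i := by simpa using hedge
      have hBne : h ≠ edge := by omega
      have hsB : stepB (acc, cursor, edge) h
          = (acc ++ [PySem.List.pyRange cursor h 1], h, h + 1) := by
        simp [stepB, hBne]
      rw [hsB, Bool.true_or]
      have hsS : specAux hdrs n ((n - (h + 1)).toNat + 1) h cursor true acc
          = specAux hdrs n (n - (h + 1)).toNat (h + 1) h false (acc ++ [PySem.List.pyRange cursor h 1]) := by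
        simp only [specAux]
        rw [if_neg hne, if_pos (by simpa using hhc)]
        simp
      rw [hsS]
      exact ih hptail (h + 1) h (h + 1) false _ (by omega) hmem' (by simp)
    · have hfl : flag = false := by
        cases flag with
        | false => rfl
        | true => exact absurd rfl hflag
      subst hfl
      have hedgeq : edge = i := by simpa using hedge
      by_cases hih : h = i
      · -- h is the cursor position itself and nothing non-header was seen: no cut
        subst hih
        have hsB : stepB (acc, cursor, edge) h = (acc, cursor, h + 1) := by
          simp [stepB, hedgeq]
        rw [hsB]
        have hor : (false || decide (h < h)) = false := by simp
        rw [hor]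
        have hsS : specAux hdrs n ((n - (h + 1)).toNat + 1) h cursor false acc
            = specAux hdrs n (n - (h + 1)).toNat (h + 1) cursor false acc := by
          simp only [specAux]
          rw [if_neg hne, if_pos (by simpa using hhc)]
          simp
        rw [hsS]
        exact ih hptail (h + 1) cursor (h + 1) false _ (by omega) hmem' (by simp)
      · -- i < h, so [i, h) contains a non-header row: cut
        have hlt : i < h := by omega
        have hBne : h ≠ edge := by omega
        have hsB : stepB (acc, cursor, edge) h
            = (acc ++ [PySem.List.pyRange cursor h 1], h, h + 1) := by
          simp [stepB, hBne]
        rw [hsB]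
        have hor : (false || decide (i < h)) = true := by simp [hlt]
        rw [hor]
        have hsS : specAux hdrs n ((n - (h + 1)).toNat + 1) h cursor true acc
            = specAux hdrs n (n - (h + 1)).toNat (h + 1) h false (acc ++ [PySem.List.pyRange cursor h 1]) := by
          simp only [specAux]
          rw [if_neg hne, if_pos (by simpa using hhc)]
          simp
        rw [hsS]
        exact ih hptail (h + 1) h (h + 1) false _ (by omega) hmem' (by simp)

-- The two port bodies agree for an arbitrary initial row id I.
lemma core (hdrs : List Int) (n I : Int) :
    ((PySem.List.pyRange I n 1).foldl (stepA n hdrs) ([], I, [])).1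
      = (if I ≥ n then []
         else
           let cs := PySem.List.sorted (PySem.Set.ofList (hdrs.filter (fun h => decide (I ≤ h ∧ h < n - 1)))) (fun x => x) false
           let st := cs.foldl stepB ([], I, I)
           st.1 ++ [PySem.List.pyRange st.2.1 n 1]) := by
  by_cases hge : I ≥ n
  · rw [PySem.List.pyRange_one_eq_nil (by omega), if_pos hge]
    rfl
  · rw [if_neg hge]
    have hpair : (PySem.List.sorted (PySem.Set.ofList (hdrs.filter (fun h => decide (I ≤ h ∧ h < n - 1)))) (fun x => x) false).Pairwise (· < ·) :=
      PySem.List.sorted_ofList_pairwise_lt _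
    have hmem : ∀ x : Int,
        x ∈ PySem.List.sorted (PySem.Set.ofList (hdrs.filter (fun h => decide (I ≤ h ∧ h < n - 1)))) (fun x => x) false
          ↔ (x ∈ hdrs ∧ I ≤ x ∧ x < n - 1) := by
      intro x
      rw [PySem.List.mem_sorted, PySem.Set.mem_ofList, List.mem_filter]
      simp only [decide_eq_true_eq]
    have hA := A_loop hdrs n (n - I).toNat I rfl [] I [] false (by simp)
    have hB := B_loop hdrs n _ hpair I I I false [] (by omega) hmem (by simp)
    exact hA.trans hB.symm

-- ===== VERDICT (by name: the statement is the Claim_ definition above) =====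
theorem split_row_ids_py_spec : Claim_equal_split_row_ids_py := by
  intro m n hdrs _
  show split_row_ids_py m n hdrs = split_row_ids_py_alt m n hdrs
  cases m with
  | none => exact core hdrs n 0
  | some v => exact core hdrs n (v + 1)
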